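-- pv_equiv track=rewrite | github.com/siddharth1199/aoc_2017 | optum_aoc/2015/day24/c.py | split_seq_in_2
-- ===== SOURCE A (Python) =====
-- def all_bool_n_sequences(n):
--     """
--     Returns a generator producing all boolean lists of length n
--     """
--     if n == 0:
--         yield []
--     else:
--         for s in all_bool_n_sequences(n-1):
--             yield [True, *s]
--             yield [False, *s]
--
-- def bool_index(seq, bool_seq, neg=False):
--     """
--     Numpy boolean indexing but for python lists
--     """
--     if not neg:
--         return [s for s, b in zip(seq, bool_seq) if b]
--     else:
--         return [s for s, b in zip(seq, bool_seq) if not b]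
--
-- def split_seq_in_2(seq):
--     """
--     Return all possible pairs (seq1, seq2) where seq1 and seq2 are
--     subsequences of seq whose union is seq
--     """
--     if not seq:
--         pass
--     else:
--         first, *rest = seq
--         for bool_seq in all_bool_n_sequences(len(rest)):
--             seq1 = [first, *bool_index(rest, bool_seq)]
--             seq2 = bool_index(rest, bool_seq, True)
--             yield (seq1, seq2)
-- ===== SOURCE B (Python) =====
-- def split_seq_in_2(seq):
--     """
--     Return all possible pairs (seq1, seq2) where seq1 and seq2 are
--     subsequences of seq whose union is seq
--     """
--     if not seq:
--         return
--     first, *rest = seq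
--     for mask in range(2 ** len(rest)):
--         seq1 = [first]
--         seq2 = []
--         m = mask
--         for x in rest:
--             m, b = divmod(m, 2)
--             (seq2 if b else seq1).append(x)
--         yield (seq1, seq2)
-- ===== Notes on version B (the rewrite author's own statement) =====
-- stated objective: simpler
-- what changed: Replaced the recursive generator of all boolean sequences plus two zip-filter passes (bool_index) by a single loop over integer masks 0..2^len(rest)-1 that distributes each element into seq1/seq2 by the mask's bits in one pass.
import Mathlib
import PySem

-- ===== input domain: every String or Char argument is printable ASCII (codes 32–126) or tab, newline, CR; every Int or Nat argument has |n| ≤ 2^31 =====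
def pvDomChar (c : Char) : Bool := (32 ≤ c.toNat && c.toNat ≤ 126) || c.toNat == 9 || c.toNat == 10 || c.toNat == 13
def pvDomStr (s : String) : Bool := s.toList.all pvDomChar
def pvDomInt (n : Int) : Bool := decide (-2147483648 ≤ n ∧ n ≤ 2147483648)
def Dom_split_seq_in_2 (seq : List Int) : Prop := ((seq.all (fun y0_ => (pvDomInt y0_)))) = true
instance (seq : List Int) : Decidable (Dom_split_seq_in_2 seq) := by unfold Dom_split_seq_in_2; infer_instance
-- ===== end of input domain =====

-- B replaces the recursive boolean-sequence generator and the two zip-filter passes by a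
-- single bitmask loop distributing elements in one pass (objective: simpler).
-- Both Pythons are generators; the ports return the list of yielded pairs.

-- ===== PORT A =====
-- all_bool_n_sequences: yields [True,*s] then [False,*s] for each s of length n-1
def boolSeqsA : Nat → List (List Bool)
  | 0 => [[]]
  | n + 1 => (boolSeqsA n).flatMap (fun s => [true :: s, false :: s])

-- bool_index: [s for s, b in zip(seq, bool_seq) if b] (neg: if not b)
def boolIndexA (seq : List Int) (bs : List Bool) (neg : Bool) : List Int :=
  if !neg then ((seq.zip bs).filter (fun p => p.2)).map (fun p => p.1)
  else ((seq.zip bs).filter (fun p => !p.2)).map (fun p => p.1)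

def split_seq_in_2 (seq : List Int) : List (List Int × List Int) :=
  match seq with
  | [] => []
  | first :: rest =>
      (boolSeqsA rest.length).map (fun bs =>
        (first :: boolIndexA rest bs false, boolIndexA rest bs true))

-- ===== PORT B =====
-- one iteration of B's inner loop: m, b = divmod(m, 2); append x to seq2 if b else seq1
def altStep (st : List Int × List Int × Int) (x : Int) : List Int × List Int × Int :=
  let q := PySem.Int.floordiv st.2.2 2
  let b := PySem.Int.mod st.2.2 2
  if b ≠ 0 then (st.1, st.2.1 ++ [x], q) else (st.1 ++ [x], st.2.1, q)

def split_seq_in_2_alt (seq : List Int) : List (List Int × List Int) :=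
  match seq with
  | [] => []
  | first :: rest =>
      (PySem.List.pyRange 0 ((2 : Int) ^ rest.length) 1).map (fun mask =>
        let st := rest.foldl altStep ([first], [], mask)
        (st.1, st.2.1))

-- ===== PRECONDITION & SPEC =====
def Spec_split_seq_in_2 (seq : List Int) (out : List (List Int × List Int)) : Prop := out = split_seq_in_2_alt seq
instance (seq : List Int) (out : List (List Int × List Int)) : Decidable (Spec_split_seq_in_2 seq out) := by unfold Spec_split_seq_in_2; infer_instance

-- ===== CLAIM (what is proved, stated in full; the proofs are below) =====
def Claim_equal_split_seq_in_2 : Prop := ∀ (seq : List Int), Dom_split_seq_in_2 seq → Spec_split_seq_in_2 seq (split_seq_in_2 seq)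

-- ===== LEMMAS AND PROOFS =====

-- the boolean sequence encoded by mask m (bit i clear ↔ position i is true)
def boolsOfNat : Nat → Nat → List Bool
  | 0, _ => []
  | n + 1, m => (m % 2 == 0) :: boolsOfNat n (m / 2)

theorem pvRangeTwoMul (k : Nat) :
    List.range (2 * k) = (List.range k).flatMap (fun q => [2 * q, 2 * q + 1]) := by
  induction k with
  | zero => simp
  | succ k ih =>
      have h : 2 * (k + 1) = (2 * k + 1) + 1 := by omega
      rw [h, List.range_succ, List.range_succ, List.range_succ, List.flatMap_append, ← ih]
      simp

theorem boolSeqsA_eq (n : Nat) :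
    boolSeqsA n = (List.range (2 ^ n)).map (boolsOfNat n) := by
  induction n with
  | zero => simp [boolSeqsA, boolsOfNat]
  | succ n ih =>
      have hp : 2 ^ (n + 1) = 2 * 2 ^ n := by ring
      rw [boolSeqsA, ih, hp, pvRangeTwoMul, List.map_flatMap, List.flatMap_map]
      apply List.flatMap_congr
      intro q _
      have h0 : (2 * q) % 2 = 0 := by omega
      have h1 : (2 * q) / 2 = q := by omega
      have h2 : (2 * q + 1) % 2 = 1 := by omega
      have h3 : (2 * q + 1) / 2 = q := by omega
      simp [boolsOfNat, h0, h1, h2, h3]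

theorem altStep_nat (s1 s2 : List Int) (m : Nat) (x : Int) :
    altStep (s1, s2, (m : Int)) x =
      if m % 2 = 0 then (s1 ++ [x], s2, ((m / 2 : Nat) : Int))
      else (s1, s2 ++ [x], ((m / 2 : Nat) : Int)) := by
  have hq : PySem.Int.floordiv (m : Int) 2 = ((m / 2 : Nat) : Int) := by
    exact_mod_cast PySem.Int.floordiv_natCast m 2
  have hb : PySem.Int.mod (m : Int) 2 = ((m % 2 : Nat) : Int) := by
    exact_mod_cast PySem.Int.mod_natCast m 2
  unfold altStep
  simp only [hq, hb]
  by_cases h : m % 2 = 0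
  · rw [if_neg (by simp [h]), if_pos h]
  · rw [if_pos (by exact_mod_cast h), if_neg h]

theorem foldl_char (rest : List Int) (m : Nat) (s1 s2 : List Int) :
    rest.foldl altStep (s1, s2, (m : Int)) =
      (s1 ++ boolIndexA rest (boolsOfNat rest.length m) false,
       s2 ++ boolIndexA rest (boolsOfNat rest.length m) true,
       ((m / 2 ^ rest.length : Nat) : Int)) := by
  induction rest generalizing m s1 s2 with
  | nil => simp [boolIndexA]
  | cons x tl ih =>
      have hdiv : m / 2 / 2 ^ tl.length = m / 2 ^ (tl.length + 1) := by
        rw [Nat.div_div_eq_div_mul]; ring_nf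
      rw [List.foldl_cons, altStep_nat]
      by_cases h : m % 2 = 0
      · rw [if_pos h, ih]
        simp [boolsOfNat, boolIndexA, h, hdiv]
      · have h1 : (m % 2 == 0) = false := by simp [h]
        rw [if_neg h, ih]
        simp [boolsOfNat, boolIndexA, h1, hdiv]

theorem main_eq (seq : List Int) : split_seq_in_2 seq = split_seq_in_2_alt seq := by
  match seq with
  | [] => rfl
  | first :: rest =>
      simp only [split_seq_in_2, split_seq_in_2_alt]
      have hr : PySem.List.pyRange 0 ((2 : Int) ^ rest.length) 1 =
          (List.range (2 ^ rest.length)).map (fun k => ((k : Nat) : Int)) := by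
        rw [PySem.List.pyRange_one]
        have : (((2 : Int) ^ rest.length) - 0).toNat = 2 ^ rest.length := by
          simp; exact_mod_cast rfl
        rw [this]
        simp
      rw [hr, boolSeqsA_eq, List.map_map, List.map_map]
      apply List.map_congr_left
      intro m _
      simp only [Function.comp_apply]
      rw [foldl_char rest m [first] []]
      simp

-- ===== VERDICT (by name: the statement is the Claim_ definition above) =====
theorem split_seq_in_2_spec : Claim_equal_split_seq_in_2 := by
  intro seq _
  unfold Spec_split_seq_in_2
  exact main_eq seq
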